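-- pv_equiv track=rewrite | github.com/LoewiLu/verbose-dollop | luckyN.py | luckyN
-- ===== SOURCE A (Python) =====
-- import itertools
--
-- def luckyN(s):
--     mylist = []
--     for i in range(len(s)):
--         if s[i]!='N':
--             mylist.append(i)
--
--     ls = list(s)
--     if len(mylist) <2:
--         return len(s)
--
--     long = 0
--     res = 0
--     dp = [0]*len(mylist)
--
--     for i in range(len(mylist)):
--
--         a, b = mylist[i-1] if i>=1 else mylist[i], mylist[i]
--         ls[a] = 'N'
--         ls[b] = 'N'
--
--         for k, g in itertools.groupby(ls):
--             if k == 'N':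
--                 long = max(len(list(g)), long)
--
--         ls[a] = 'X'
--         ls[b] = 'X'
--         dp[i] = long
--
--         res = max(res, dp[i])
--
--     return res
-- ===== SOURCE B (Python) =====
-- def luckyN(s):
--     # One pass: lengths of maximal 'N'-runs (gaps) separated by the non-'N' chars,
--     # then the best "flip two consecutive non-'N' chars" is the best sum of three
--     # consecutive gaps plus 2.
--     gaps = []
--     cur = 0
--     for c in s:
--         if c == 'N':
--             cur += 1
--         else:
--             gaps.append(cur)
--             cur = 0
--     gaps.append(cur)
--     k = len(gaps) - 1  # number of non-'N' characters
--     if k < 2: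
--         return len(s)
--     best = 0
--     for j in range(k - 1):
--         best = max(best, gaps[j] + gaps[j + 1] + gaps[j + 2] + 2)
--     return best
-- ===== Notes on version B (the rewrite author's own statement) =====
-- stated objective: faster
-- what changed: Replaced the loop that, for every consecutive pair of non-'N' indices, flips them and rescans the whole string with itertools.groupby, by a single pass that records the lengths of maximal 'N'-runs (gaps) and takes the maximum sum of three consecutive gaps plus 2.
import Mathlib
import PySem

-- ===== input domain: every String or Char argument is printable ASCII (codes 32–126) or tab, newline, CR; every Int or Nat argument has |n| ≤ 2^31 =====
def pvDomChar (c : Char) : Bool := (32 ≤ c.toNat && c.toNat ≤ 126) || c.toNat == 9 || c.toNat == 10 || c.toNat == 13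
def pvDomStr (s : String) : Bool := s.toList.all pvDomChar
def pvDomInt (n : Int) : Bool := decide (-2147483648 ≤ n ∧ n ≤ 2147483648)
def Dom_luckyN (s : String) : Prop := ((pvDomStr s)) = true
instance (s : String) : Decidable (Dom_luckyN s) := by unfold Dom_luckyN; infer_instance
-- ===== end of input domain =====

-- B replaces A's rescan-the-whole-string-per-pair loop by one gap-counting pass (objective: faster).
-- All list indices in both programs are nonnegative and in range, so Nat indexing (List.range/getD/set)
-- is exact for the Python int indexing here.

-- ===== PORT A =====
-- itertools.groupby: consecutive runs as (key, run-length) pairs (A only uses the length of list(g)).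
def pvRunsAux : Char → Nat → List Char → List (Char × Nat)
  | c, n, [] => [(c, n)]
  | c, n, d :: t => if d = c then pvRunsAux c (n + 1) t else (c, n) :: pvRunsAux d 1 t

def pvGroupRuns : List Char → List (Char × Nat)
  | [] => []
  | c :: t => pvRunsAux c 1 t

def luckyN (s : String) : Int :=
  let ls0 := s.toList
  let mylist := (List.range ls0.length).foldl
    (fun acc i => if ls0.getD i ' ' ≠ 'N' then acc ++ [i] else acc) []
  if mylist.length < 2 then PySem.Str.len s
  else
    let st := (List.range mylist.length).foldl
      (fun (st : List Char × Nat × Nat × List Nat) i =>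
        let ls := st.1
        let long := st.2.1
        let res := st.2.2.1
        let dp := st.2.2.2
        let a := if 1 ≤ i then mylist.getD (i - 1) 0 else mylist.getD i 0
        let b := mylist.getD i 0
        let ls1 := (ls.set a 'N').set b 'N'
        let long1 := (pvGroupRuns ls1).foldl
          (fun acc kg => if kg.1 = 'N' then max kg.2 acc else acc) long
        let ls2 := (ls1.set a 'X').set b 'X'
        let dp1 := dp.set i long1
        let res1 := max res (dp1.getD i 0)
        (ls2, long1, res1, dp1))
      (ls0, 0, 0, List.replicate mylist.length 0)
    (st.2.2.1 : Int)

-- ===== PORT B =====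
def luckyN_alt (s : String) : Int :=
  let p := s.toList.foldl
    (fun (st : List Nat × Nat) c => if c = 'N' then (st.1, st.2 + 1) else (st.1 ++ [st.2], 0))
    ([], 0)
  let gaps := p.1 ++ [p.2]
  let k := gaps.length - 1
  if k < 2 then PySem.Str.len s
  else
    ((List.range (k - 1)).foldl
      (fun best j => max best (gaps.getD j 0 + gaps.getD (j + 1) 0 + gaps.getD (j + 2) 0 + 2))
      0 : Int)

-- ===== PRECONDITION & SPEC =====
def Spec_luckyN (s : String) (out : Int) : Prop := out = luckyN_alt s
instance (s : String) (out : Int) : Decidable (Spec_luckyN s out) := by unfold Spec_luckyN; infer_instance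

-- ===== CLAIM (what is proved, stated in full; the proofs are below) =====
def Claim_equal_luckyN : Prop := ∀ (s : String), Dom_luckyN s → Spec_luckyN s (luckyN s)

-- ===== LEMMAS AND PROOFS =====

-- lengths of the maximal 'N'-runs of a char list, in order (k non-'N' chars give k+1 gaps)
def pvGaps : List Char → List Nat
  | [] => [0]
  | c :: t =>
    if c = 'N' then
      match pvGaps t with
      | h :: r => (h + 1) :: r
      | [] => [1]
    else 0 :: pvGaps t

-- positions of the non-'N' chars, in increasing order
def pvNpos : List Char → List Nat
  | [] => []
  | c :: t => if c = 'N' then (pvNpos t).map (· + 1) else 0 :: (pvNpos t).map (· + 1)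

def pvMergeAt : Nat → List Nat → List Nat
  | 0, a :: b :: c :: r => (a + b + c + 2) :: r
  | j + 1, a :: r => a :: pvMergeAt j r
  | _, l => l

def pvMergeFirst : List Nat → List Nat
  | a :: b :: r => (a + b + 1) :: r
  | l => l

def pvLM (l : List Nat) : Nat := l.foldl max 0

def pvTerm (G : List Nat) : Nat → Nat
  | 0 => pvLM (pvMergeFirst G)
  | j + 1 => pvLM (pvMergeAt j G)

def pvTrip (G : List Nat) (j : Nat) : Nat :=
  G.getD j 0 + G.getD (j + 1) 0 + G.getD (j + 2) 0 + 2

def pvConsGap (c : Char) (n : Nat) : List Nat → List Nat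
  | [] => []
  | h :: r => if c = 'N' then (n + h) :: r else h :: r

lemma pvGaps_ne_nil (l : List Char) : pvGaps l ≠ [] := by
  induction l with
  | nil => simp [pvGaps]
  | cons c t ih =>
    simp only [pvGaps]
    split
    · rcases h : pvGaps t with _ | ⟨h0, r⟩ <;> simp
    · simp

lemma pvGaps_length (l : List Char) : (pvGaps l).length = (pvNpos l).length + 1 := by
  induction l with
  | nil => simp [pvGaps, pvNpos]
  | cons c t ih =>
    simp only [pvGaps, pvNpos]
    split
    · rcases h : pvGaps t with _ | ⟨h0, r⟩
      · exact absurd h (pvGaps_ne_nil t)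
      · rw [h] at ih; simpa using ih
    · simpa using ih

lemma pv_foldl_max (l : List Nat) (a : Nat) : l.foldl max a = max a (l.foldl max 0) := by
  induction l generalizing a with
  | nil => simp
  | cons b l ih =>
    simp only [List.foldl_cons]
    rw [ih (max a b), ih (max 0 b)]
    omega

lemma pvLM_cons (a : Nat) (l : List Nat) : pvLM (a :: l) = max a (pvLM l) := by
  simp only [pvLM, List.foldl_cons]
  rw [pv_foldl_max]
  omega

lemma le_pvLM_of_mem {x : Nat} {l : List Nat} (h : x ∈ l) : x ≤ pvLM l := by
  induction l with
  | nil => cases h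
  | cons a l ih =>
    rw [pvLM_cons]
    rcases List.mem_cons.mp h with rfl | h'
    · omega
    · have := ih h'; omega

lemma pvLM_le {l : List Nat} {c : Nat} (h : ∀ x ∈ l, x ≤ c) : pvLM l ≤ c := by
  induction l with
  | nil => simp [pvLM]
  | cons a l ih =>
    rw [pvLM_cons]
    have h1 := h a (List.mem_cons_self ..)
    have h2 := ih fun x hx => h x (List.mem_cons_of_mem _ hx)
    omega


-- getD / set helpers
lemma pv_getD_eq {α : Type} {l : List α} {i : Nat} (d : α) (h : i < l.length) :
    l.getD i d = l[i] := by
  simp [List.getD_eq_getElem?_getD, List.getElem?_eq_getElem h]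

lemma pv_getD_mem {α : Type} {l : List α} {i : Nat} (d : α) (h : i < l.length) :
    l.getD i d ∈ l := by
  rw [pv_getD_eq d h]; exact List.getElem_mem h

lemma pv_getD_set_self {α : Type} {l : List α} {i : Nat} {x d : α} (h : i < l.length) :
    (l.set i x).getD i d = x := by
  rw [pv_getD_eq d (by simpa using h)]
  simp [List.getElem_set_self]

lemma pv_getD_set_ne {α : Type} {l : List α} {i j : Nat} {x d : α} (h : i ≠ j) :
    (l.set i x).getD j d = l.getD j d := by
  by_cases hj : j < l.length
  · rw [pv_getD_eq d (by simpa using hj), pv_getD_eq d hj]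
    exact List.getElem_set_ne h _
  · rw [List.getD_eq_getElem?_getD, List.getD_eq_getElem?_getD]
    rw [List.getElem?_eq_none (by simpa using hj), List.getElem?_eq_none (by omega)]

lemma pv_getD_map_add {l : List Nat} {j : Nat} (h : j < l.length) :
    (l.map (· + 1)).getD j 0 = l.getD j 0 + 1 := by
  rw [pv_getD_eq 0 (by simpa using h), pv_getD_eq 0 h]
  simp

-- positions of non-'N' chars: bounds, chars, strict monotonicity
lemma pvNpos_char {l : List Char} {x : Nat} (h : x ∈ pvNpos l) : l.getD x ' ' ≠ 'N' := by
  induction l generalizing x with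
  | nil => simp [pvNpos] at h
  | cons c t ih =>
    simp only [pvNpos] at h
    split at h
    · obtain ⟨y, hy, rfl⟩ := List.mem_map.mp h
      simpa using ih hy
    · rcases List.mem_cons.mp h with rfl | h'
      · simpa using ‹¬c = 'N'›
      · obtain ⟨y, hy, rfl⟩ := List.mem_map.mp h'
        simpa using ih hy

lemma pvNpos_sorted (l : List Char) : (pvNpos l).Pairwise (· < ·) := by
  induction l with
  | nil => simp [pvNpos]
  | cons c t ih =>
    simp only [pvNpos]
    have hm : ((pvNpos t).map (· + 1)).Pairwise (· < ·) := by
      refine List.pairwise_map.mpr ?_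
      exact ih.imp (by omega)
    split
    · exact hm
    · refine List.pairwise_cons.mpr ⟨?_, hm⟩
      intro a ha
      obtain ⟨y, hy, rfl⟩ := List.mem_map.mp ha
      omega

lemma pvNpos_strict {l : List Char} {j : Nat} (h : j + 1 < (pvNpos l).length) :
    (pvNpos l).getD j 0 < (pvNpos l).getD (j + 1) 0 := by
  rw [pv_getD_eq 0 (by omega), pv_getD_eq 0 h]
  exact List.pairwise_iff_getElem.mp (pvNpos_sorted l) j (j + 1) (by omega) h (by omega)

-- mylist computed by port A equals pvNpos
lemma pv_foldl_filter {α : Type} (p : α → Bool) :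
    ∀ (l : List α) (acc : List α),
      l.foldl (fun acc i => if p i then acc ++ [i] else acc) acc = acc ++ l.filter p := by
  intro l
  induction l with
  | nil => simp
  | cons a l ih =>
    intro acc
    simp only [List.foldl_cons, List.filter_cons]
    by_cases h : p a <;> simp [h, ih]

lemma pv_mylist_eq (l : List Char) :
    (List.range l.length).foldl
      (fun acc i => if l.getD i ' ' ≠ 'N' then acc ++ [i] else acc) [] = pvNpos l := by
  have h1 : ∀ acc, (List.range l.length).foldl
      (fun acc i => if l.getD i ' ' ≠ 'N' then acc ++ [i] else acc) acc
      = acc ++ (List.range l.length).filter (fun i => l.getD i ' ' ≠ 'N') := by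
    intro acc
    have := pv_foldl_filter (fun i => decide (l.getD i ' ' ≠ 'N')) (List.range l.length) acc
    simpa using this
  rw [h1, List.nil_append]
  clear h1
  induction l with
  | nil => simp [pvNpos]
  | cons c t ih =>
    rw [List.length_cons, List.range_succ_eq_map, List.filter_cons, List.filter_map]
    simp only [pvNpos]
    have hcomp : (fun i => decide ((c :: t).getD i ' ' ≠ 'N')) ∘ (· + 1)
        = fun i => decide (t.getD i ' ' ≠ 'N') := by
      funext i; simp [List.getD]
    rw [hcomp, ih]
    by_cases h : c = 'N' <;> simp [h, List.getD]


-- A's groupby fold computes the running max of 'N'-run lengths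
lemma pvRunsAux_fold :
    ∀ (t : List Char) (c : Char) (n : Nat) (acc : Nat),
      (pvRunsAux c n t).foldl (fun acc kg => if kg.1 = 'N' then max kg.2 acc else acc) acc
        = max acc (pvLM (pvConsGap c n (pvGaps t))) := by
  intro t
  induction t with
  | nil =>
    intro c n acc
    by_cases h : c = 'N' <;> simp [pvRunsAux, pvGaps, pvConsGap, pvLM, h]
    omega
  | cons d t ih =>
    intro c n acc
    rcases hg : pvGaps t with _ | ⟨h0, r⟩
    · exact absurd hg (pvGaps_ne_nil t)
    by_cases hc : c = 'N'
    · subst hc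
      by_cases hd : d = 'N'
      · subst hd
        simp [pvRunsAux, pvGaps, hg, pvConsGap, pvLM_cons, ih]
        omega
      · simp [pvRunsAux, pvGaps, hg, pvConsGap, pvLM_cons, ih, hd]
        omega
    · by_cases hd : d = 'N'
      · subst hd
        simp [pvRunsAux, pvGaps, hg, pvConsGap, pvLM_cons, ih, hc,
          if_neg (show ¬('N' = c) from fun h => hc h.symm)]
        omega
      · by_cases hdc : d = c
        · subst hdc
          simp [pvRunsAux, pvGaps, hg, pvConsGap, pvLM_cons, ih, hd]
        · simp [pvRunsAux, pvGaps, hg, pvConsGap, pvLM_cons, ih, hd, hc, hdc]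

lemma pvGroupRuns_fold (l : List Char) (acc : Nat) :
    (pvGroupRuns l).foldl (fun acc kg => if kg.1 = 'N' then max kg.2 acc else acc) acc
      = max acc (pvLM (pvGaps l)) := by
  cases l with
  | nil => simp [pvGroupRuns, pvGaps, pvLM]
  | cons c t =>
    rw [pvGroupRuns, pvRunsAux_fold]
    rcases hg : pvGaps t with _ | ⟨h0, r⟩
    · exact absurd hg (pvGaps_ne_nil t)
    by_cases hc : c = 'N' <;> simp [pvGaps, hg, pvConsGap, pvLM_cons, hc]
    omega

-- setting a non-'N' position to a non-'N' char changes neither pvGaps nor pvNpos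
lemma pvGaps_set {l : List Char} {p : Nat} {x : Char}
    (hp : l.getD p ' ' ≠ 'N') (hx : x ≠ 'N') : pvGaps (l.set p x) = pvGaps l := by
  induction l generalizing p with
  | nil => simp
  | cons c t ih =>
    cases p with
    | zero =>
      simp only [List.getD] at hp
      simp only [List.set]
      simp only [pvGaps, if_neg hx, if_neg (by simpa using hp)]
    | succ p =>
      simp only [List.getD] at hp
      simp only [List.set, pvGaps, ih (by simpa using hp)]

lemma pvNpos_set {l : List Char} {p : Nat} {x : Char}
    (hp : l.getD p ' ' ≠ 'N') (hx : x ≠ 'N') : pvNpos (l.set p x) = pvNpos l := by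
  induction l generalizing p with
  | nil => simp
  | cons c t ih =>
    cases p with
    | zero =>
      simp only [List.getD] at hp
      simp only [List.set]
      simp only [pvNpos, if_neg hx, if_neg (by simpa using hp)]
    | succ p =>
      simp only [List.getD] at hp
      simp only [List.set, pvNpos, ih (by simpa using hp)]

-- flipping the first non-'N' char merges the first two gaps
lemma pvGaps_set_first {l : List Char} (h : pvNpos l ≠ []) :
    pvGaps (l.set ((pvNpos l).getD 0 0) 'N') = pvMergeFirst (pvGaps l) := by
  induction l with
  | nil => simp [pvNpos] at h
  | cons c t ih =>
    by_cases hc : c = 'N'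
    · subst hc
      simp only [pvNpos, reduceIte] at h ⊢
      have ht : pvNpos t ≠ [] := by simpa using h
      rcases hn : pvNpos t with _ | ⟨p, ps⟩
      · exact absurd hn ht
      have hih := ih ht
      rw [hn] at hih
      simp only [List.getD, List.getElem?_cons_zero, Option.getD_some] at hih
      simp only [List.map_cons, List.getD, List.getElem?_cons_zero, Option.getD_some,
        List.set_cons_succ]
      rcases hg : pvGaps t with _ | ⟨a, r⟩
      · exact absurd hg (pvGaps_ne_nil t)
      rcases r with _ | ⟨b, r⟩
      · exfalso
        have := pvGaps_length t
        rw [hg, hn] at this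
        simp at this
      rw [hg] at hih
      simp only [pvGaps, reduceIte, hih, hg, pvMergeFirst]
      have : a + b + 1 + 1 = a + 1 + b + 1 := by omega
      rw [this]
    · simp only [pvNpos, if_neg hc, List.getD, List.getElem?_cons_zero, Option.getD_some,
        List.set_cons_zero]
      rcases hg : pvGaps t with _ | ⟨a, r⟩
      · exact absurd hg (pvGaps_ne_nil t)
      simp only [pvGaps, reduceIte, if_neg hc, hg, pvMergeFirst]
      have : a + 1 = 0 + a + 1 := by omega
      rw [this]

-- flipping the j-th and (j+1)-th non-'N' chars merges gaps j, j+1, j+2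
lemma pvGaps_set_pair :
    ∀ (l : List Char) (j : Nat), j + 1 < (pvNpos l).length →
      pvGaps ((l.set ((pvNpos l).getD j 0) 'N').set ((pvNpos l).getD (j + 1) 0) 'N')
        = pvMergeAt j (pvGaps l) := by
  intro l
  induction l with
  | nil => intro j hj; simp [pvNpos] at hj
  | cons c t ih =>
    intro j hj
    by_cases hc : c = 'N'
    · subst hc
      simp only [pvNpos, reduceIte] at hj ⊢
      have hj' : j + 1 < (pvNpos t).length := by simpa using hj
      rw [pv_getD_map_add (by omega), pv_getD_map_add (by omega),
        List.set_cons_succ, List.set_cons_succ]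
      have hlen := pvGaps_length t
      rcases hg : pvGaps t with _ | ⟨a, r⟩
      · exact absurd hg (pvGaps_ne_nil t)
      have hrec := ih j hj'
      rw [hg] at hrec
      simp only [pvGaps, reduceIte, hrec, hg]
      cases j with
      | zero =>
        rcases r with _ | ⟨b, r⟩
        · exfalso; rw [hg] at hlen; simp at hlen
          first
          | omega
          | (rw [hlen] at hj'; simp at hj')
        rcases r with _ | ⟨d, r⟩
        · exfalso; rw [hg] at hlen; simp at hlen; omega
        simp [pvMergeAt]
        omega
      | succ j =>
        simp [pvMergeAt]
    · simp only [pvNpos, if_neg hc] at hj ⊢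
      cases j with
      | zero =>
        have hj' : 0 < (pvNpos t).length := by simp at hj; omega
        have ht : pvNpos t ≠ [] := by
          intro hnil; rw [hnil] at hj'; simp at hj'
        rcases hn : pvNpos t with _ | ⟨p, ps⟩
        · exact absurd hn ht
        simp only [List.map_cons, List.getD, List.getElem?_cons_zero, List.getElem?_cons_succ,
          Option.getD_some, List.set_cons_zero, List.set_cons_succ]
        have hfirst := pvGaps_set_first ht
        rw [hn] at hfirst
        simp only [List.getD, List.getElem?_cons_zero, Option.getD_some] at hfirst
        have hlen := pvGaps_length t
        rcases hg : pvGaps t with _ | ⟨a, r⟩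
        · exact absurd hg (pvGaps_ne_nil t)
        rcases r with _ | ⟨b, r⟩
        · exfalso; rw [hg, hn] at hlen; simp at hlen
        rw [hg] at hfirst
        simp only [pvGaps, reduceIte, if_neg hc, hfirst, hg, pvMergeFirst, pvMergeAt]
        have : a + b + 1 + 1 = 0 + a + b + 2 := by omega
        rw [this]
      | succ j =>
        have hj' : j + 1 < (pvNpos t).length := by simp at hj; omega
        have e1 : (0 :: (pvNpos t).map (· + 1)).getD (j + 1) 0 = (pvNpos t).getD j 0 + 1 := by
          rw [List.getD_cons_succ]; exact pv_getD_map_add (by omega)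
        have e2 : (0 :: (pvNpos t).map (· + 1)).getD (j + 1 + 1) 0
            = (pvNpos t).getD (j + 1) 0 + 1 := by
          rw [List.getD_cons_succ]; exact pv_getD_map_add (by omega)
        rw [e1, e2, List.set_cons_succ, List.set_cons_succ]
        simp only [pvGaps, if_neg hc, ih j hj', pvMergeAt]


-- the merged triple is an element of pvMergeAt
lemma pvTrip_mem_mergeAt :
    ∀ (j : Nat) (G : List Nat), j + 2 < G.length → pvTrip G j ∈ pvMergeAt j G := by
  intro j
  induction j with
  | zero =>
    intro G hG
    rcases G with _ | ⟨a, _ | ⟨b, _ | ⟨c, r⟩⟩⟩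
    · simp at hG
    · simp at hG
    · simp at hG
    · simp [pvTrip, pvMergeAt, List.getD]
  | succ j ih =>
    intro G hG
    rcases G with _ | ⟨a, G⟩
    · simp at hG
    have := ih G (by simp at hG; omega)
    simp only [pvMergeAt, List.mem_cons]
    right
    simpa [pvTrip, List.getD] using this

lemma pvLM_mergeAt_le (j : Nat) (G : List Nat) :
    pvLM (pvMergeAt j G) ≤ max (pvTrip G j) (pvLM G) := by
  induction j generalizing G with
  | zero =>
    rcases G with _ | ⟨a, _ | ⟨b, _ | ⟨c, r⟩⟩⟩
    · simp [pvMergeAt]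
    · simp [pvMergeAt]
    · simp [pvMergeAt]
    · simp only [pvMergeAt, pvTrip, List.getD, List.getElem?_cons_zero, List.getElem?_cons_succ,
        Option.getD_some]
      rw [pvLM_cons, pvLM_cons, pvLM_cons, pvLM_cons]
      omega
  | succ j ih =>
    rcases G with _ | ⟨a, G⟩
    · simp [pvMergeAt]
    simp only [pvMergeAt]
    rw [pvLM_cons, pvLM_cons]
    have h1 := ih G
    have h2 : pvTrip G j = pvTrip (a :: G) (j + 1) := by simp [pvTrip, List.getD]
    omega

lemma pvLM_mergeFirst_le (G : List Nat) (hG : 2 ≤ G.length) :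
    pvLM (pvMergeFirst G) ≤ max (pvTrip G 0) (pvLM G) := by
  rcases G with _ | ⟨a, _ | ⟨b, r⟩⟩
  · simp at hG
  · simp at hG
  simp only [pvMergeFirst, pvTrip, List.getD, List.getElem?_cons_zero, List.getElem?_cons_succ,
    Option.getD_some]
  rw [pvLM_cons, pvLM_cons, pvLM_cons]
  rcases r with _ | ⟨c, r⟩
  · simp [pvLM]
  · simp only [List.getElem?_cons_zero, Option.getD_some]
    rw [pvLM_cons]
    omega

-- B's single pass builds exactly pvGaps
def pvHeadAdd (n : Nat) : List Nat → List Nat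
  | [] => [n]
  | h :: r => (n + h) :: r

lemma pvB_gaps :
    ∀ (l : List Char) (gs : List Nat) (cur : Nat),
      (l.foldl (fun (st : List Nat × Nat) c =>
          if c = 'N' then (st.1, st.2 + 1) else (st.1 ++ [st.2], 0)) (gs, cur)).1
        ++ [(l.foldl (fun (st : List Nat × Nat) c =>
          if c = 'N' then (st.1, st.2 + 1) else (st.1 ++ [st.2], 0)) (gs, cur)).2]
      = gs ++ pvHeadAdd cur (pvGaps l) := by
  intro l
  induction l with
  | nil => intro gs cur; simp [pvGaps, pvHeadAdd]
  | cons c t ih =>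
    intro gs cur
    by_cases hc : c = 'N'
    · rw [List.foldl_cons]
      simp only [hc, reduceIte]
      rw [ih]
      rcases hg : pvGaps t with _ | ⟨a, r⟩
      · exact absurd hg (pvGaps_ne_nil t)
      simp only [pvGaps, reduceIte, hg, pvHeadAdd]
      have : cur + 1 + a = cur + (a + 1) := by omega
      rw [this]
    · rw [List.foldl_cons]
      simp only [if_neg hc]
      rw [ih]
      rcases hg : pvGaps t with _ | ⟨a, r⟩
      · exact absurd hg (pvGaps_ne_nil t)
      simp only [pvGaps, if_neg hc, hg, pvHeadAdd]
      simp

-- a fold of running maxes is the max of the mapped list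
lemma pv_foldl_maxf {α : Type} (f : α → Nat) :
    ∀ (l : List α) (a : Nat),
      l.foldl (fun acc j => max acc (f j)) a = max a (pvLM (l.map f)) := by
  intro l
  induction l with
  | nil => simp [pvLM]
  | cons b l ih =>
    intro a
    rw [List.foldl_cons, ih, List.map_cons, pvLM_cons]
    omega


-- the per-iteration value A's loop adds at index i
-- (pvTerm G 0 for the degenerate i = 0 iteration, pvTerm G (j+1) for the pair (j, j+1))

-- running A's loop: the res component is the running max of pvTerm G over the index list
lemma pv_loopA (m G : List Nat) :
    ∀ (idx : List Nat) (ls : List Char) (long res : Nat) (dp : List Nat),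
      pvNpos ls = m → pvGaps ls = G → (∀ i ∈ idx, i < m.length) → res = long →
      dp.length = m.length →
      (idx.foldl
        (fun (st : List Char × Nat × Nat × List Nat) i =>
          let ls := st.1
          let long := st.2.1
          let res := st.2.2.1
          let dp := st.2.2.2
          let a := if 1 ≤ i then m.getD (i - 1) 0 else m.getD i 0
          let b := m.getD i 0
          let ls1 := (ls.set a 'N').set b 'N'
          let long1 := (pvGroupRuns ls1).foldl
            (fun acc kg => if kg.1 = 'N' then max kg.2 acc else acc) long
          let ls2 := (ls1.set a 'X').set b 'X'
          let dp1 := dp.set i long1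
          let res1 := max res (dp1.getD i 0)
          (ls2, long1, res1, dp1)) (ls, long, res, dp)).2.2.1
      = idx.foldl (fun acc i => max acc (pvTerm G i)) long := by
  intro idx
  induction idx with
  | nil => intro ls long res dp hm hG _ hres _; simpa using hres
  | cons i idx ih =>
    intro ls long res dp hm hG hidx hres hdp
    have hi : i < m.length := hidx i (List.mem_cons_self ..)
    have hXN : ('X' : Char) ≠ 'N' := by decide
    rw [List.foldl_cons, List.foldl_cons]
    set b := m.getD i 0 with hbdef
    have hbm : b ∈ m := pv_getD_mem 0 hi
    have hbpos : b ∈ pvNpos ls := hm ▸ hbm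
    have hbch : ls.getD b ' ' ≠ 'N' := pvNpos_char hbpos
    by_cases h1 : 1 ≤ i
    · -- the pair (m[i-1], m[i]) with i ≥ 1
      obtain ⟨j, rfl⟩ : ∃ j, i = j + 1 := ⟨i - 1, by omega⟩
      set a := m.getD (j + 1 - 1) 0 with hadef
      have haj : a = m.getD j 0 := by simp [hadef]
      have hab : a ≠ b := by
        have := pvNpos_strict (l := ls) (j := j) (by rw [hm]; omega)
        rw [hm] at this
        rw [haj, hbdef]
        omega
      have ham : a ∈ m := by rw [haj]; exact pv_getD_mem 0 (by omega)
      have hach : ls.getD a ' ' ≠ 'N' := pvNpos_char (hm ▸ ham)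
      have hpair : pvGaps ((ls.set a 'N').set b 'N') = pvMergeAt j G := by
        rw [← hG, ← hm] at *
        rw [haj, hbdef, ← hm]
        exact pvGaps_set_pair ls j (by rw [hm]; omega)
      simp only [if_pos h1]
      have hgr := pvGroupRuns_fold ((ls.set a 'N').set b 'N') long
      rw [hpair] at hgr
      set long1 := (pvGroupRuns ((ls.set a 'N').set b 'N')).foldl
        (fun acc kg => if kg.1 = 'N' then max kg.2 acc else acc) long with hl1
      have hterm : long1 = max long (pvTerm G (j + 1)) := by rw [hgr]; rfl
      have hls2 : (((ls.set a 'N').set b 'N').set a 'X').set b 'X'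
          = (ls.set a 'X').set b 'X' := by
        rw [List.set_comm 'N' 'X' (fun h => hab h.symm), List.set_set, List.set_set]
      have hset1 : (ls.set a 'X').getD b ' ' ≠ 'N' := by
        rw [pv_getD_set_ne hab]; exact hbch
      have hnpos2 : pvNpos ((ls.set a 'X').set b 'X') = m := by
        rw [pvNpos_set hset1 hXN, pvNpos_set hach hXN, hm]
      have hgaps2 : pvGaps ((ls.set a 'X').set b 'X') = G := by
        rw [pvGaps_set hset1 hXN, pvGaps_set hach hXN, hG]
      have hgetdp : ((dp.set (j + 1) long1).getD (j + 1) 0) = long1 :=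
        pv_getD_set_self (by omega)
      rw [hls2, hgetdp]
      have hlong_le : long ≤ long1 := by rw [hterm]; omega
      have hres1 : max res long1 = long1 := by rw [hres]; omega
      rw [hres1]
      rw [ih ((ls.set a 'X').set b 'X') long1 long1 (dp.set (j + 1) long1) hnpos2 hgaps2
        (fun x hx => hidx x (List.mem_cons_of_mem _ hx)) rfl (by simp [hdp])]
      rw [hterm]
    · -- the degenerate first iteration: a = b = m[0]
      have hi0 : i = 0 := by omega
      subst hi0
      simp only [if_neg h1]
      have hmne : pvNpos ls ≠ [] := by rw [hm]; intro h; rw [h] at hi; simp at hi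
      have hfirst : pvGaps ((ls.set b 'N').set b 'N') = pvMergeFirst G := by
        rw [List.set_set, ← hG, hbdef, ← hm]
        exact pvGaps_set_first hmne
      have hgr := pvGroupRuns_fold ((ls.set b 'N').set b 'N') long
      rw [hfirst] at hgr
      set long1 := (pvGroupRuns ((ls.set b 'N').set b 'N')).foldl
        (fun acc kg => if kg.1 = 'N' then max kg.2 acc else acc) long with hl1
      have hterm : long1 = max long (pvTerm G 0) := by rw [hgr]; rfl
      have hls2 : (((ls.set b 'N').set b 'N').set b 'X').set b 'X' = ls.set b 'X' := by
        rw [List.set_set, List.set_set, List.set_set]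
      have hnpos2 : pvNpos (ls.set b 'X') = m := by rw [pvNpos_set hbch hXN, hm]
      have hgaps2 : pvGaps (ls.set b 'X') = G := by rw [pvGaps_set hbch hXN, hG]
      have hgetdp : ((dp.set 0 long1).getD 0 0) = long1 := pv_getD_set_self (by omega)
      rw [hls2, hgetdp]
      have hres1 : max res long1 = long1 := by rw [hres, hterm]; omega
      rw [hres1]
      rw [ih (ls.set b 'X') long1 long1 (dp.set 0 long1) hnpos2 hgaps2
        (fun x hx => hidx x (List.mem_cons_of_mem _ hx)) rfl (by simp [hdp])]
      rw [hterm]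

-- the final max over all iterations equals the max over triples of consecutive gaps
lemma pv_final (G : List Nat) (k : Nat) (hk : 2 ≤ k) (hlen : G.length = k + 1) :
    pvLM ((List.range k).map (pvTerm G)) = pvLM ((List.range (k - 1)).map (pvTrip G)) := by
  have htripR : ∀ j, j < k - 1 → pvTrip G j ≤ pvLM ((List.range (k - 1)).map (pvTrip G)) :=
    fun j hj => le_pvLM_of_mem (List.mem_map.mpr ⟨j, List.mem_range.mpr hj, rfl⟩)
  have hGR : pvLM G ≤ pvLM ((List.range (k - 1)).map (pvTrip G)) := by
    apply pvLM_le
    intro x hx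
    obtain ⟨t, ht, rfl⟩ := List.mem_iff_getElem.mp hx
    have hj : min t (k - 2) < k - 1 := by omega
    refine le_trans ?_ (htripR _ hj)
    have h3 : t = min t (k - 2) ∨ t = min t (k - 2) + 1 ∨ t = min t (k - 2) + 2 := by omega
    have e0 : G.getD t 0 = G[t] := pv_getD_eq 0 ht
    rcases h3 with h | h | h <;>
      · unfold pvTrip
        rw [← h, e0]
        omega
  apply Nat.le_antisymm
  · apply pvLM_le
    intro x hx
    obtain ⟨i, hi, rfl⟩ := List.mem_map.mp hx
    have hik : i < k := List.mem_range.mp hi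
    cases i with
    | zero =>
      have := pvLM_mergeFirst_le G (by omega)
      have h0 := htripR 0 (by omega)
      calc pvTerm G 0 ≤ max (pvTrip G 0) (pvLM G) := this
        _ ≤ _ := by omega
    | succ j =>
      have := pvLM_mergeAt_le j G
      have h0 := htripR j (by omega)
      calc pvTerm G (j + 1) ≤ max (pvTrip G j) (pvLM G) := this
        _ ≤ _ := by omega
  · apply pvLM_le
    intro x hx
    obtain ⟨j, hj, rfl⟩ := List.mem_map.mp hx
    have hjk : j < k - 1 := List.mem_range.mp hj
    have hmem : pvTrip G j ∈ pvMergeAt j G := pvTrip_mem_mergeAt j G (by omega)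
    refine le_trans (le_pvLM_of_mem hmem) ?_
    exact le_pvLM_of_mem (List.mem_map.mpr ⟨j + 1, List.mem_range.mpr (by omega), rfl⟩)


-- Nat-level core equality for the non-degenerate branch
lemma pv_main (l : List Char) (hk : 2 ≤ (pvNpos l).length) :
    ((List.range (pvNpos l).length).foldl
      (fun (st : List Char × Nat × Nat × List Nat) i =>
        let ls := st.1
        let long := st.2.1
        let res := st.2.2.1
        let dp := st.2.2.2
        let a := if 1 ≤ i then (pvNpos l).getD (i - 1) 0 else (pvNpos l).getD i 0
        let b := (pvNpos l).getD i 0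
        let ls1 := (ls.set a 'N').set b 'N'
        let long1 := (pvGroupRuns ls1).foldl
          (fun acc kg => if kg.1 = 'N' then max kg.2 acc else acc) long
        let ls2 := (ls1.set a 'X').set b 'X'
        let dp1 := dp.set i long1
        let res1 := max res (dp1.getD i 0)
        (ls2, long1, res1, dp1))
      (l, 0, 0, List.replicate (pvNpos l).length 0)).2.2.1
    = (List.range ((pvNpos l).length - 1)).foldl
        (fun best j => max best ((pvGaps l).getD j 0 + (pvGaps l).getD (j + 1) 0
          + (pvGaps l).getD (j + 2) 0 + 2)) 0 := by
  rw [pv_loopA (pvNpos l) (pvGaps l) (List.range (pvNpos l).length) l 0 0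
    (List.replicate (pvNpos l).length 0) rfl rfl
    (fun i hi => List.mem_range.mp hi) rfl (by simp)]
  rw [pv_foldl_maxf (pvTerm (pvGaps l)) (List.range (pvNpos l).length) 0]
  rw [pv_foldl_maxf (fun j => (pvGaps l).getD j 0 + (pvGaps l).getD (j + 1) 0
    + (pvGaps l).getD (j + 2) 0 + 2) (List.range ((pvNpos l).length - 1)) 0]
  simp only [Nat.zero_max]
  have := pv_final (pvGaps l) (pvNpos l).length hk (pvGaps_length l)
  simpa [pvTrip] using this


-- the Int-valued running max in port B is the cast of the Nat-valued one
lemma pv_foldl_max_int (g1 g2 g3 : Nat → Nat) :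
    ∀ (l : List Nat) (a : Nat),
      l.foldl (fun (b : Int) j => max b ((g1 j : Int) + (g2 j : Int) + (g3 j : Int) + 2)) (a : Int)
        = ((l.foldl (fun b j => max b (g1 j + g2 j + g3 j + 2)) a : Nat) : Int) := by
  intro l
  induction l with
  | nil => intro a; simp
  | cons x l ih =>
    intro a
    rw [List.foldl_cons, List.foldl_cons]
    have : max (a : Int) ((g1 x : Int) + (g2 x : Int) + (g3 x : Int) + 2)
        = ((max a (g1 x + g2 x + g3 x + 2) : Nat) : Int) := by
      push_cast
      rfl
    rw [this, ih]

-- ===== VERDICT (by name: the statement is the Claim_ definition above) =====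
theorem luckyN_spec : Claim_equal_luckyN := by
  intro s _
  unfold Spec_luckyN luckyN luckyN_alt
  have hB := pvB_gaps s.toList [] 0
  rcases hg : pvGaps s.toList with _ | ⟨a0, r0⟩
  · exact absurd hg (pvGaps_ne_nil s.toList)
  rw [hg] at hB
  simp only [pvHeadAdd, List.nil_append, Nat.zero_add] at hB
  have hGlen := pvGaps_length s.toList
  rw [hg] at hGlen
  have hk : (a0 :: r0).length - 1 = (pvNpos s.toList).length := by omega
  simp only [pv_mylist_eq, hB, hk]
  by_cases hcase : (pvNpos s.toList).length < 2
  · simp only [if_pos hcase]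
  · simp only [if_neg hcase]
    have hmain := pv_main s.toList (by omega)
    rw [hg] at hmain
    have hcast := pv_foldl_max_int (fun j => (a0 :: r0).getD j 0)
      (fun j => (a0 :: r0).getD (j + 1) 0) (fun j => (a0 :: r0).getD (j + 2) 0)
      (List.range ((pvNpos s.toList).length - 1)) 0
    rw [Nat.cast_zero] at hcast
    rw [hcast]
    exact congrArg (fun n : Nat => (n : Int)) hmain
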